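-- pv_equiv track=rewrite | github.com/luzujian/internship-system | frontend/convert_to_ts.py | add_type_imports
-- ===== SOURCE A (Python) =====
-- def add_type_imports(content, type_imports):
--     """Add type imports from @/types/admin"""
--     if "from '@/types/admin'" in content or 'from "@/types/admin"' in content:
--         return content
--
--     lines = content.split('\n')
--     new_lines = []
--     imports_added = False
--
--     type_import_line = f"import type {{ {', '.join(type_imports)} }} from '@/types/admin'\n"
--
--     for i, line in enumerate(lines):
--         new_lines.append(line)
--         if not imports_added and "from 'vue'" in line:
--             new_lines.append(type_import_line)
--             imports_added = True
--
--     return '\n'.join(new_lines)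
-- ===== SOURCE B (Python) =====
-- def add_type_imports(content, type_imports):
--     """Add type imports from @/types/admin"""
--     if "from '@/types/admin'" in content or 'from "@/types/admin"' in content:
--         return content
--
--     type_import_line = f"import type {{ {', '.join(type_imports)} }} from '@/types/admin'\n"
--
--     p = content.find("from 'vue'")
--     if p == -1:
--         return content
--     nl = content.find('\n', p)
--     if nl == -1:
--         return content + '\n' + type_import_line
--     return content[:nl + 1] + type_import_line + '\n' + content[nl + 1:]
-- ===== Notes on version B (the rewrite author's own statement) =====
-- stated objective: simpler
-- what changed: Replaces split('\n')/indexed loop with flag/'\n'.join by direct string surgery: find the first "from 'vue'" occurrence, find the newline ending its line, and splice the import line in with two slices.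
import Mathlib
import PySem

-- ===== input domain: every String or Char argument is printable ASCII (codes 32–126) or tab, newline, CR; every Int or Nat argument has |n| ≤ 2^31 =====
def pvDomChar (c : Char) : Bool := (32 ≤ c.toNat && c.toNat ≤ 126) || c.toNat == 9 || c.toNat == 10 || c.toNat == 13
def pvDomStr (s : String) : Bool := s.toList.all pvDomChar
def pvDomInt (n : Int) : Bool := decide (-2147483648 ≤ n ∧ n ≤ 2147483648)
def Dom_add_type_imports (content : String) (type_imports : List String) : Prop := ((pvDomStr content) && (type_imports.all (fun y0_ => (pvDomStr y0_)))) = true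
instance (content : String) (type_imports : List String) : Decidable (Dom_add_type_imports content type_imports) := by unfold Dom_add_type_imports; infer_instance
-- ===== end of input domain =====

-- B replaces A's split('\n') / indexed flag loop / '\n'.join by direct string surgery (find the
-- first "from 'vue'" occurrence, find the newline ending its line, splice with two slices).

-- ===== PORT A =====
def add_type_imports (content : String) (type_imports : List String) : String :=
  if PySem.Chars.isIn "from '@/types/admin'".toList content.toList
      || PySem.Chars.isIn "from \"@/types/admin\"".toList content.toList then content
  else
    let lines := PySem.Chars.splitOn content.toList ['\n']
    let type_import_line := "import type { ".toList
      ++ PySem.Chars.join ", ".toList (type_imports.map String.toList)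
      ++ " } from '@/types/admin'\n".toList
    let r := (PySem.List.enumerate lines).foldl
      (fun (st : List (List Char) × Bool) il =>
        let st1 := (st.1 ++ [il.2], st.2)
        if !st1.2 && PySem.Chars.isIn "from 'vue'".toList il.2 then (st1.1 ++ [type_import_line], true)
        else st1)
      ([], false)
    String.ofList (PySem.Chars.join ['\n'] r.1)

-- ===== PORT B =====
def add_type_imports_alt (content : String) (type_imports : List String) : String :=
  if PySem.Chars.isIn "from '@/types/admin'".toList content.toList
      || PySem.Chars.isIn "from \"@/types/admin\"".toList content.toList then content
  else
    let type_import_line := "import type { ".toList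
      ++ PySem.Chars.join ", ".toList (type_imports.map String.toList)
      ++ " } from '@/types/admin'\n".toList
    let p := PySem.Chars.find content.toList "from 'vue'".toList
    if p = -1 then content
    else
      let q := PySem.Chars.findFrom content.toList ['\n'] p none
      if q = -1 then String.ofList (content.toList ++ "\n".toList ++ type_import_line)
      else String.ofList (PySem.Chars.slice content.toList none (some (q + 1)) ++ type_import_line
        ++ "\n".toList ++ PySem.Chars.slice content.toList (some (q + 1)) none)

-- ===== PRECONDITION & SPEC =====
def Spec_add_type_imports (content : String) (type_imports : List String) (out : String) : Prop := out = add_type_imports_alt content type_imports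
instance (content : String) (type_imports : List String) (out : String) : Decidable (Spec_add_type_imports content type_imports out) := by unfold Spec_add_type_imports; infer_instance

-- ===== CLAIM (what is proved, stated in full; the proofs are below) =====
def Claim_equal_add_type_imports : Prop := ∀ (content : String) (type_imports : List String), Dom_add_type_imports content type_imports → Spec_add_type_imports content type_imports (add_type_imports content type_imports)

-- ===== LEMMAS AND PROOFS =====

def pvSplit1 : List Char → List (List Char)
  | [] => [[]]
  | c :: cs => if c = '\n' then [] :: pvSplit1 cs else List.modifyHead (c :: ·) (pvSplit1 cs)

theorem pvSplit1_ne_nil (cs : List Char) : pvSplit1 cs ≠ [] := by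
  induction cs with
  | nil => simp [pvSplit1]
  | cons c cs ih =>
    simp only [pvSplit1]
    cases h : pvSplit1 cs with
    | nil => exact absurd h ih
    | cons r rs => split <;> simp

theorem pvGo_eq (fuel : Nat) (l cur : List Char) (acc : List (List Char)) (h : l.length ≤ fuel) :
    PySem.Chars.splitOn.go ['\n'] fuel l cur acc
      = acc.reverse ++ List.modifyHead (cur.reverse ++ ·) (pvSplit1 l) := by
  induction fuel generalizing l cur acc with
  | zero =>
    have : l = [] := by cases l <;> simp_all
    subst this
    simp [PySem.Chars.splitOn.go, pvSplit1]
  | succ fuel ih =>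
    cases l with
    | nil => simp [PySem.Chars.splitOn.go, pvSplit1]
    | cons c rest =>
      have hlen : rest.length ≤ fuel := by simpa using h
      rw [PySem.Chars.splitOn.go]
      by_cases hc : c = '\n'
      · subst hc
        rw [if_pos (by simp [List.isPrefixOf])]
        simp only [List.length_cons, List.length_nil, Nat.zero_add, List.drop_succ_cons,
          List.drop_zero]
        rw [ih _ _ _ hlen]
        cases hs : pvSplit1 rest with
        | nil => exact absurd hs (pvSplit1_ne_nil rest)
        | cons r rs => simp [pvSplit1, hs, List.modifyHead]
      · rw [if_neg (by simp only [List.isPrefixOf, Bool.and_eq_true, beq_iff_eq, and_true]; exact fun h => hc h.symm)]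
        rw [ih _ _ _ hlen]
        cases hs : pvSplit1 rest with
        | nil => exact absurd hs (pvSplit1_ne_nil rest)
        | cons r rs => simp [pvSplit1, hs, List.modifyHead, hc]

theorem pvSplitOn_eq (cs : List Char) : PySem.Chars.splitOn cs ['\n'] = pvSplit1 cs := by
  rw [PySem.Chars.splitOn, pvGo_eq _ _ _ _ (by omega)]
  cases hs : pvSplit1 cs with
  | nil => exact absurd hs (pvSplit1_ne_nil cs)
  | cons r rs => simp [List.modifyHead]

theorem pvJoin_split1 (cs : List Char) : PySem.Chars.join ['\n'] (pvSplit1 cs) = cs := by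
  induction cs with
  | nil => simp [pvSplit1, PySem.Chars.join_singleton]
  | cons c rest ih =>
    simp only [pvSplit1]
    by_cases hc : c = '\n'
    · subst hc
      rw [if_pos rfl]
      cases hs : pvSplit1 rest with
      | nil => exact absurd hs (pvSplit1_ne_nil rest)
      | cons r rs =>
        rw [hs] at ih
        rw [PySem.Chars.join_cons_cons, ← ih]
        simp
    · rw [if_neg hc]
      cases hs : pvSplit1 rest with
      | nil => exact absurd hs (pvSplit1_ne_nil rest)
      | cons r rs =>
        rw [hs] at ih
        rw [List.modifyHead_cons]
        cases rs with
        | nil => rw [PySem.Chars.join_singleton] at ih ⊢; simp [ih]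
        | cons q qs =>
          rw [PySem.Chars.join_cons_cons] at ih ⊢
          simp [← ih]

theorem pvMem_split1 (cs l : List Char) (h : l ∈ pvSplit1 cs) : '\n' ∉ l := by
  induction cs generalizing l with
  | nil => simp [pvSplit1] at h; simp [h]
  | cons c rest ih =>
    simp only [pvSplit1] at h
    by_cases hc : c = '\n'
    · subst hc; rw [if_pos rfl] at h
      rcases List.mem_cons.mp h with h | h
      · simp [h]
      · exact ih _ h
    · rw [if_neg hc] at h
      cases hs : pvSplit1 rest with
      | nil => exact absurd hs (pvSplit1_ne_nil rest)
      | cons r rs =>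
        rw [hs, List.modifyHead_cons] at h
        rcases List.mem_cons.mp h with h | h
        · subst h
          intro hm
          rcases List.mem_cons.mp hm with h | h
          · exact hc h.symm
          · exact ih r (by rw [hs]; exact List.mem_cons_self ..) h
        · exact ih _ (by rw [hs]; exact List.mem_cons_of_mem _ h)


theorem pvDropAppend (l t : List Char) (i : Nat) (h : l.length ≤ i) :
    (l ++ t).drop i = t.drop (i - l.length) := by
  rw [List.drop_append, List.drop_eq_nil_of_le h, List.nil_append]

theorem pvPrefixSplit (sub l t : List Char) (hnl : '\n' ∉ sub) (i : Nat)
    (hi : sub <+: (l ++ '\n' :: t).drop i) :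
    (sub <+: l.drop i ∧ i + sub.length ≤ l.length)
      ∨ (l.length + 1 ≤ i ∧ sub <+: t.drop (i - (l.length + 1))) := by
  by_cases h1 : l.length + 1 ≤ i
  · right
    refine ⟨h1, ?_⟩
    have he : (l ++ '\n' :: t).drop i = t.drop (i - (l.length + 1)) := by
      rw [show l ++ '\n' :: t = (l ++ ['\n']) ++ t by simp, pvDropAppend _ _ _ (by simp; omega)]
      congr 1
      simp
    rwa [he] at hi
  · rw [not_le] at h1
    have hil : i ≤ l.length := by omega
    rw [List.drop_append_of_le_length hil] at hi
    by_cases h2 : i + sub.length ≤ l.length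
    · left
      refine ⟨?_, h2⟩
      exact (List.isPrefix_append_of_length (by simp; omega)).mp hi
    · exfalso
      rw [not_le] at h2
      obtain ⟨u, hu⟩ := hi
      have hj : l.length - i < sub.length := by omega
      have e1 : (sub ++ u)[l.length - i]'(by simp; omega)
          = (List.drop i l ++ '\n' :: t)[l.length - i]'(by rw [← hu]; simp; omega) :=
        List.getElem_of_eq hu _
      have e2 : (sub ++ u)[l.length - i]'(by simp; omega) = sub[l.length - i]'hj :=
        List.getElem_append_left ..
      have e3 : (List.drop i l ++ '\n' :: t)[l.length - i]'(by rw [← hu]; simp; omega) = '\n' := by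
        rw [List.getElem_append_right (by simp)]
        simp
      have hch : sub[l.length - i]'hj = '\n' := (e2.symm.trans e1).trans e3
      exact hnl (hch ▸ List.getElem_mem hj)

theorem pvFind_eq (s sub : List Char) (k : Nat) (h1 : sub <+: s.drop k)
    (h2 : ∀ i < k, ¬ sub <+: s.drop i) : PySem.Chars.find s sub = (k : Int) := by
  have hinf : sub <:+: s := h1.isInfix.trans (List.drop_suffix k s).isInfix
  have h0 : 0 ≤ PySem.Chars.find s sub := (PySem.Chars.find_nonneg_iff s sub).mpr hinf
  obtain ⟨hp, hmin⟩ := PySem.Chars.find_spec h0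
  rcases lt_trichotomy (PySem.Chars.find s sub).toNat k with h | h | h
  · exact absurd hp (h2 _ h)
  · omega
  · exact absurd h1 (hmin k h)

theorem pvPrefixNl (x : List Char) (c : Char) : [c] <+: x ↔ ∃ y, x = c :: y := by
  constructor
  · rintro ⟨y, rfl⟩; exact ⟨y, rfl⟩
  · rintro ⟨y, rfl⟩; exact ⟨y, rfl⟩

theorem pvFindNl_append (a b : List Char) (h : '\n' ∉ a) :
    PySem.Chars.find (a ++ '\n' :: b) ['\n'] = (a.length : Int) := by
  apply pvFind_eq
  · rw [pvDropAppend _ _ _ (le_refl _)]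
    simp
  · intro i hi hpre
    rw [List.drop_append_of_le_length (by omega), List.drop_eq_getElem_cons hi] at hpre
    rcases (pvPrefixNl _ _).mp hpre with ⟨y, hy⟩
    rw [List.cons_append] at hy
    have : a[i] = '\n' := ((List.cons.injEq _ _ _ _).mp hy).1
    exact h (this ▸ List.getElem_mem hi)

theorem pvFindNl_none (a : List Char) (h : '\n' ∉ a) :
    PySem.Chars.find a ['\n'] = -1 := by
  rw [PySem.Chars.find_eq_neg_one_iff]
  rintro ⟨s, t, rfl⟩
  exact h (by simp)

theorem pvInfix_iff_exists_drop (sub s : List Char) :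
    sub <:+: s ↔ ∃ j, sub <+: s.drop j := by
  rw [← PySem.Chars.isIn_iff_infix, ← PySem.Chars.exists_prefix_drop_iff_isIn]

theorem pvFind_append_left (sub l t : List Char) (hnl : '\n' ∉ sub) (h : sub <:+: l) :
    PySem.Chars.find (l ++ '\n' :: t) sub = PySem.Chars.find l sub := by
  have h0 : 0 ≤ PySem.Chars.find l sub := (PySem.Chars.find_nonneg_iff l sub).mpr h
  obtain ⟨hp, hmin⟩ := PySem.Chars.find_spec h0
  have hk : (PySem.Chars.find l sub).toNat ≤ l.length := by
    have := PySem.Chars.find_le_length l sub; omega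
  rw [show PySem.Chars.find l sub = ((PySem.Chars.find l sub).toNat : Int) by omega]
  apply pvFind_eq
  · rw [List.drop_append_of_le_length hk]
    exact hp.trans (List.prefix_append ..)
  · intro i hi hpre
    rcases pvPrefixSplit sub l t hnl i hpre with ⟨hp2, _⟩ | ⟨hge, _⟩
    · exact hmin i hi hp2
    · omega

theorem pvFind_append_right (sub l t : List Char) (hnl : '\n' ∉ sub)
    (h1 : ¬ sub <:+: l) (h2 : sub <:+: t) :
    PySem.Chars.find (l ++ '\n' :: t) sub
      = ((l.length + 1 + (PySem.Chars.find t sub).toNat : Nat) : Int) := by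
  have h0 : 0 ≤ PySem.Chars.find t sub := (PySem.Chars.find_nonneg_iff t sub).mpr h2
  obtain ⟨hp, hmin⟩ := PySem.Chars.find_spec h0
  apply pvFind_eq
  · have he : (l ++ '\n' :: t).drop (l.length + 1 + (PySem.Chars.find t sub).toNat)
        = t.drop (PySem.Chars.find t sub).toNat := by
      rw [show l ++ '\n' :: t = (l ++ ['\n']) ++ t by simp, pvDropAppend _ _ _ (by simp)]
      congr 1
      simp
    rw [he]
    exact hp
  · intro i hi hpre
    rcases pvPrefixSplit sub l t hnl i hpre with ⟨hp2, _⟩ | ⟨hge, hp2⟩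
    · exact h1 (hp2.isInfix.trans (List.drop_suffix i l).isInfix)
    · exact hmin _ (by omega) hp2

theorem pvFind_append_none (sub l t : List Char) (hnl : '\n' ∉ sub)
    (h1 : ¬ sub <:+: l) (h2 : ¬ sub <:+: t) :
    PySem.Chars.find (l ++ '\n' :: t) sub = -1 := by
  rw [PySem.Chars.find_eq_neg_one_iff]
  intro hinf
  rcases (pvInfix_iff_exists_drop _ _).mp hinf with ⟨j, hj⟩
  rcases pvPrefixSplit sub l t hnl j hj with ⟨hp2, _⟩ | ⟨_, hp2⟩
  · exact h1 (hp2.isInfix.trans (List.drop_suffix j l).isInfix)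
  · exact h2 (hp2.isInfix.trans (List.drop_suffix _ t).isInfix)


def pvInsA (tl : List Char) : List (List Char) → List (List Char)
  | [] => []
  | l :: rest =>
    if PySem.Chars.isIn "from 'vue'".toList l then l :: tl :: rest else l :: pvInsA tl rest

def pvF (tl : List Char) (st : List (List Char) × Bool) (il : Int × List Char) :
    List (List Char) × Bool :=
  let st1 := (st.1 ++ [il.2], st.2)
  if !st1.2 && PySem.Chars.isIn "from 'vue'".toList il.2 then (st1.1 ++ [tl], true) else st1

theorem pvEnum_cons {α : Type} (x : α) (t : List α) (k : Int) :
    PySem.List.enumerate (x :: t) k = (k, x) :: PySem.List.enumerate t (k + 1) := by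
  simp [PySem.List.enumerate]

theorem pvLoop_true (tl : List Char) (ls : List (List Char)) (k : Int) (acc : List (List Char)) :
    List.foldl (pvF tl) (acc, true) (PySem.List.enumerate ls k) = (acc ++ ls, true) := by
  induction ls generalizing k acc with
  | nil => simp [PySem.List.enumerate]
  | cons l ls ih =>
    rw [pvEnum_cons, List.foldl_cons]
    rw [show pvF tl (acc, true) (k, l) = (acc ++ [l], true) from by
      simp only [pvF, Bool.not_true, Bool.false_and]; simp]
    rw [ih]
    simp

theorem pvLoop_false (tl : List Char) (ls : List (List Char)) (k : Int) (acc : List (List Char)) :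
    (List.foldl (pvF tl) (acc, false) (PySem.List.enumerate ls k)).1 = acc ++ pvInsA tl ls := by
  induction ls generalizing k acc with
  | nil => simp [PySem.List.enumerate, pvInsA]
  | cons l ls ih =>
    rw [pvEnum_cons, List.foldl_cons]
    by_cases hv : PySem.Chars.isIn "from 'vue'".toList l = true
    · rw [show pvF tl (acc, false) (k, l) = (acc ++ [l] ++ [tl], true) from by
        simp only [pvF, Bool.not_false, Bool.true_and, hv]; simp]
      rw [pvLoop_true]
      rw [show pvInsA tl (l :: ls) = l :: tl :: ls from by simp only [pvInsA, hv]; simp]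
      simp
    · have hv' : PySem.Chars.isIn "from 'vue'".toList l = false := by
        simpa using hv
      rw [show pvF tl (acc, false) (k, l) = (acc ++ [l], false) from by
        simp only [pvF, Bool.not_false, Bool.true_and, hv']; simp]
      rw [ih]
      rw [show pvInsA tl (l :: ls) = l :: pvInsA tl ls from by simp only [pvInsA, hv']; simp]
      simp


-- proof-side form of B's post-guard core
def pvBcore (tl cs : List Char) : List Char :=
  let p := PySem.Chars.find cs "from 'vue'".toList
  if p = -1 then cs
  else
    let q := PySem.Chars.findFrom cs ['\n'] p none
    if q = -1 then cs ++ "\n".toList ++ tl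
    else PySem.Chars.slice cs none (some (q + 1)) ++ tl ++ "\n".toList
      ++ PySem.Chars.slice cs (some (q + 1)) none

def pvTl (type_imports : List String) : List Char :=
  "import type { ".toList ++ PySem.Chars.join ", ".toList (type_imports.map String.toList)
    ++ " } from '@/types/admin'\n".toList

theorem pvNlList : "\n".toList = ['\n'] := rfl

theorem pvVueNoNl : '\n' ∉ "from 'vue'".toList := by decide

theorem pvTakeAppend (l t : List Char) (i : Nat) (h : l.length ≤ i) :
    (l ++ t).take i = l ++ t.take (i - l.length) := by
  rw [List.take_append, List.take_of_length_le h]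

theorem pvInsA_ne_nil (tl : List Char) (ls : List (List Char)) (h : ls ≠ []) :
    pvInsA tl ls ≠ [] := by
  cases ls with
  | nil => exact absurd rfl h
  | cons l rest => simp only [pvInsA]; split <;> simp

theorem pvJoin_cons (a : List Char) (ls : List (List Char)) (h : ls ≠ []) :
    PySem.Chars.join ['\n'] (a :: ls) = a ++ '\n' :: PySem.Chars.join ['\n'] ls := by
  cases ls with
  | nil => exact absurd rfl h
  | cons b bs => rw [PySem.Chars.join_cons_cons]; simp

theorem pvB_single (tl l : List Char) (hnl : '\n' ∉ l) :
    pvBcore tl l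
      = if PySem.Chars.isIn "from 'vue'".toList l then l ++ ['\n'] ++ tl else l := by
  by_cases hv : PySem.Chars.isIn "from 'vue'".toList l = true
  · rw [if_pos hv]
    have hinf := (PySem.Chars.isIn_iff_infix _ _).mp hv
    have h0 : 0 ≤ PySem.Chars.find l "from 'vue'".toList :=
      (PySem.Chars.find_nonneg_iff _ _).mpr hinf
    have hk : (PySem.Chars.find l "from 'vue'".toList).toNat ≤ l.length := by
      have := PySem.Chars.find_le_length l "from 'vue'".toList; omega
    simp only [pvBcore]
    rw [if_neg (by omega)]
    rw [show PySem.Chars.find l "from 'vue'".toList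
        = (((PySem.Chars.find l "from 'vue'".toList).toNat : Nat) : Int) from by omega]
    rw [PySem.Chars.findFrom_natCast _ _ _ hk]
    rw [pvFindNl_none _ (fun hm => hnl (List.mem_of_mem_drop hm))]
    rw [if_pos rfl, if_pos rfl, pvNlList]
  · have hv' : PySem.Chars.isIn "from 'vue'".toList l = false := by simpa using hv
    rw [if_neg hv]
    have hf : PySem.Chars.find l "from 'vue'".toList = -1 :=
      (PySem.Chars.find_eq_neg_one_iff _ _).mpr ((PySem.Chars.isIn_eq_false_iff _ _).mp hv')
    simp only [pvBcore]
    rw [if_pos hf]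

theorem pvB_cons_hit (tl l ts : List Char) (hnl : '\n' ∉ l)
    (hv : PySem.Chars.isIn "from 'vue'".toList l = true) :
    pvBcore tl (l ++ '\n' :: ts) = l ++ ['\n'] ++ tl ++ ['\n'] ++ ts := by
  have hinf := (PySem.Chars.isIn_iff_infix _ _).mp hv
  have h0 : 0 ≤ PySem.Chars.find l "from 'vue'".toList :=
    (PySem.Chars.find_nonneg_iff _ _).mpr hinf
  have hk : (PySem.Chars.find l "from 'vue'".toList).toNat ≤ l.length := by
    have := PySem.Chars.find_le_length l "from 'vue'".toList; omega
  have hfw : PySem.Chars.findFrom (l ++ '\n' :: ts) ['\n']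
      (PySem.Chars.find l "from 'vue'".toList) none = ((l.length : Nat) : Int) := by
    rw [show PySem.Chars.find l "from 'vue'".toList
        = (((PySem.Chars.find l "from 'vue'".toList).toNat : Nat) : Int) from by omega]
    rw [PySem.Chars.findFrom_natCast _ _ _
      (by simp only [List.length_append, List.length_cons]; omega)]
    rw [List.drop_append_of_le_length hk]
    rw [pvFindNl_append _ _ (fun hm => hnl (List.mem_of_mem_drop hm))]
    simp only [List.length_drop]
    rw [if_neg (show ¬(((l.length - (PySem.Chars.find l "from 'vue'".toList).toNat : Nat) : Int)
      = -1) from by omega)]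
    omega
  simp only [pvBcore]
  rw [pvFind_append_left "from 'vue'".toList l ts pvVueNoNl hinf]
  rw [if_neg (by omega), hfw]
  rw [if_neg (by omega)]
  rw [PySem.Chars.slice_eq_listSlice, PySem.Chars.slice_eq_listSlice]
  rw [PySem.List.slice_to _ (by omega), PySem.List.slice_from _ (by omega)]
  rw [show (((l.length : Nat) : Int) + 1).toNat = (l ++ ['\n']).length from by simp only [List.length_append, List.length_cons, List.length_nil]; omega]
  rw [show l ++ '\n' :: ts = (l ++ ['\n']) ++ ts from by simp]
  rw [pvTakeAppend _ _ _ (le_refl _), pvDropAppend _ _ _ (le_refl _)]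
  simp [pvNlList]

theorem pvB_cons_miss (tl l ts : List Char)
    (hv : PySem.Chars.isIn "from 'vue'".toList l = false) :
    pvBcore tl (l ++ '\n' :: ts) = l ++ '\n' :: pvBcore tl ts := by
  have hninf : ¬ "from 'vue'".toList <:+: l := (PySem.Chars.isIn_eq_false_iff _ _).mp hv
  by_cases hv2 : "from 'vue'".toList <:+: ts
  · have h0 : 0 ≤ PySem.Chars.find ts "from 'vue'".toList :=
      (PySem.Chars.find_nonneg_iff _ _).mpr hv2
    have hkp : (PySem.Chars.find ts "from 'vue'".toList).toNat ≤ ts.length := by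
      have := PySem.Chars.find_le_length ts "from 'vue'".toList; omega
    have hdrop : (l ++ '\n' :: ts).drop (l.length + 1 + (PySem.Chars.find ts "from 'vue'".toList).toNat) = ts.drop (PySem.Chars.find ts "from 'vue'".toList).toNat := by
      rw [show l ++ '\n' :: ts = (l ++ ['\n']) ++ ts from by simp]
      rw [pvDropAppend _ _ _ (by simp only [List.length_append, List.length_cons, List.length_nil]; omega)]
      congr 1
      simp only [List.length_append, List.length_cons, List.length_nil]
      omega
    have hfw := PySem.Chars.findFrom_natCast (l ++ '\n' :: ts) ['\n'] (l.length + 1 + (PySem.Chars.find ts "from 'vue'".toList).toNat) (by simp only [List.length_append, List.length_cons]; omega)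
    rw [hdrop] at hfw
    have hfw2 := PySem.Chars.findFrom_natCast ts ['\n'] (PySem.Chars.find ts "from 'vue'".toList).toNat hkp
    rw [show (((PySem.Chars.find ts "from 'vue'".toList).toNat : Nat) : Int) = PySem.Chars.find ts "from 'vue'".toList from by omega] at hfw2
    simp only [pvBcore]
    rw [pvFind_append_right "from 'vue'".toList l ts pvVueNoNl hninf hv2]
    rw [if_neg (by omega), hfw]
    rw [if_neg (show ¬(PySem.Chars.find ts "from 'vue'".toList = -1) from by omega), hfw2]
    by_cases hr : PySem.Chars.find (ts.drop (PySem.Chars.find ts "from 'vue'".toList).toNat) ['\n'] = -1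
    · rw [if_pos hr, if_pos hr, if_pos rfl, if_pos rfl]
      simp [pvNlList]
    · have hr0 : 0 ≤ PySem.Chars.find (ts.drop (PySem.Chars.find ts "from 'vue'".toList).toNat) ['\n'] := by
        have := PySem.Chars.neg_one_le_find (ts.drop (PySem.Chars.find ts "from 'vue'".toList).toNat) ['\n']; omega
      rw [if_neg hr, if_neg hr]
      rw [if_neg (show ¬(((l.length + 1 + (PySem.Chars.find ts "from 'vue'".toList).toNat : Nat) : Int) + PySem.Chars.find (ts.drop (PySem.Chars.find ts "from 'vue'".toList).toNat) ['\n'] = -1) from by omega)]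
      rw [if_neg (show ¬(PySem.Chars.find ts "from 'vue'".toList + PySem.Chars.find (ts.drop (PySem.Chars.find ts "from 'vue'".toList).toNat) ['\n'] = -1) from by omega)]
      rw [PySem.Chars.slice_eq_listSlice, PySem.Chars.slice_eq_listSlice,
        PySem.Chars.slice_eq_listSlice, PySem.Chars.slice_eq_listSlice]
      rw [PySem.List.slice_to _ (by omega), PySem.List.slice_from _ (by omega),
        PySem.List.slice_to _ (by omega), PySem.List.slice_from _ (by omega)]
      rw [show (((l.length + 1 + (PySem.Chars.find ts "from 'vue'".toList).toNat : Nat) : Int) + PySem.Chars.find (ts.drop (PySem.Chars.find ts "from 'vue'".toList).toNat) ['\n'] + 1).toNat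
          = (l ++ ['\n']).length + ((PySem.Chars.find ts "from 'vue'".toList).toNat + (PySem.Chars.find (ts.drop (PySem.Chars.find ts "from 'vue'".toList).toNat) ['\n']).toNat + 1) from by simp only [List.length_append, List.length_cons, List.length_nil]; omega]
      rw [show (PySem.Chars.find ts "from 'vue'".toList + PySem.Chars.find (ts.drop (PySem.Chars.find ts "from 'vue'".toList).toNat) ['\n'] + 1).toNat = (PySem.Chars.find ts "from 'vue'".toList).toNat + (PySem.Chars.find (ts.drop (PySem.Chars.find ts "from 'vue'".toList).toNat) ['\n']).toNat + 1 from by omega]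
      rw [show l ++ '\n' :: ts = (l ++ ['\n']) ++ ts from by simp]
      rw [pvTakeAppend _ _ _ (Nat.le_add_right _ _), pvDropAppend _ _ _ (Nat.le_add_right _ _)]
      rw [Nat.add_sub_cancel_left]
      simp [pvNlList]
  · have hfn := pvFind_append_none "from 'vue'".toList l ts pvVueNoNl hninf hv2
    have hfts : PySem.Chars.find ts "from 'vue'".toList = -1 :=
      (PySem.Chars.find_eq_neg_one_iff _ _).mpr hv2
    simp only [pvBcore]
    rw [if_pos hfn, if_pos hfts]

theorem pvMain (tl : List Char) (ls : List (List Char)) (hne : ls ≠ [])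
    (hnl : ∀ l ∈ ls, '\n' ∉ l) :
    pvBcore tl (PySem.Chars.join ['\n'] ls) = PySem.Chars.join ['\n'] (pvInsA tl ls) := by
  induction ls with
  | nil => exact absurd rfl hne
  | cons l rest ih =>
    cases rest with
    | nil =>
      rw [PySem.Chars.join_singleton]
      rw [pvB_single tl l (hnl l (List.mem_cons_self ..))]
      by_cases hv : PySem.Chars.isIn "from 'vue'".toList l = true
      · rw [if_pos hv]
        rw [show pvInsA tl [l] = [l, tl] from by simp only [pvInsA, hv]; simp]
        rw [PySem.Chars.join_cons_cons, PySem.Chars.join_singleton]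
      · have hv' : PySem.Chars.isIn "from 'vue'".toList l = false := by simpa using hv
        rw [if_neg hv]
        rw [show pvInsA tl [l] = [l] from by simp only [pvInsA, hv']; simp]
        rw [PySem.Chars.join_singleton]
    | cons b bs =>
      rw [pvJoin_cons l (b :: bs) (by simp)]
      by_cases hv : PySem.Chars.isIn "from 'vue'".toList l = true
      · rw [pvB_cons_hit tl l _ (hnl l (List.mem_cons_self ..)) hv]
        rw [show pvInsA tl (l :: b :: bs) = l :: tl :: b :: bs from by
          simp only [pvInsA, hv]; simp]
        rw [PySem.Chars.join_cons_cons, PySem.Chars.join_cons_cons]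
        simp
      · have hv' : PySem.Chars.isIn "from 'vue'".toList l = false := by simpa using hv
        rw [pvB_cons_miss tl l _ hv']
        rw [ih (by simp) (fun x hx => hnl x (List.mem_cons_of_mem _ hx))]
        rw [show pvInsA tl (l :: b :: bs) = l :: pvInsA tl (b :: bs) from by
          simp only [pvInsA, hv']; simp]
        rw [pvJoin_cons l _ (pvInsA_ne_nil tl _ (by simp))]

theorem pvA_eq (content : String) (type_imports : List String) :
    add_type_imports content type_imports
      = if PySem.Chars.isIn "from '@/types/admin'".toList content.toList
          || PySem.Chars.isIn "from \"@/types/admin\"".toList content.toList then content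
        else String.ofList (PySem.Chars.join ['\n']
          ((PySem.List.enumerate (PySem.Chars.splitOn content.toList ['\n'])).foldl
            (pvF (pvTl type_imports)) ([], false)).1) := rfl

theorem pvAlt_eq (content : String) (type_imports : List String) :
    add_type_imports_alt content type_imports
      = if PySem.Chars.isIn "from '@/types/admin'".toList content.toList
          || PySem.Chars.isIn "from \"@/types/admin\"".toList content.toList then content
        else String.ofList (pvBcore (pvTl type_imports) content.toList) := by
  simp only [add_type_imports_alt, pvBcore, pvTl]
  split_ifs with hg hp hq
  · rfl
  · exact String.ofList_toList.symm
  · rfl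
  · rfl

-- ===== VERDICT (by name: the statement is the Claim_ definition above) =====
theorem add_type_imports_spec : Claim_equal_add_type_imports := by
  intro content type_imports _
  unfold Spec_add_type_imports
  rw [pvA_eq, pvAlt_eq]
  split_ifs with hg
  · rfl
  · congr 1
    rw [pvSplitOn_eq]
    rw [pvLoop_false (pvTl type_imports) (pvSplit1 content.toList) 0 []]
    rw [List.nil_append]
    conv_rhs => rw [← pvJoin_split1 content.toList]
    rw [pvMain (pvTl type_imports) (pvSplit1 content.toList) (pvSplit1_ne_nil _)
      (fun l hl => pvMem_split1 _ l hl)]
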